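-- pv_equiv track=rewrite | github.com/benquick123/code-profiling | code/batch-1/dn6/M-71.py | omembe
-- ===== SOURCE A (Python) =====
-- def unikati(s):
--     nov = []
--     for el in s:
--         if el not in nov:
--             nov.append(el)
--     return nov
--
-- def avtor(tvit):
--     return tvit.split(":")[0]
--
-- def vsi_avtorji(tviti):
--     seznam_avotrjev = []
--     for vrstica in tviti:
--         seznam_avotrjev.append(avtor(vrstica))
--     return unikati(seznam_avotrjev)
--
-- def izloci_besedo(beseda):
--     for c in beseda:
--         if c.isalnum():
--             break
--         else:
--             beseda = beseda[1:]
--     beseda = beseda[::-1]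
--     for c2 in beseda:
--         if c2.isalnum():
--             break
--         else:
--             beseda = beseda[1:]
--     return beseda[::-1]
--
-- def se_zacne_z(tvit, c):
--     nove = []
--     for cha in tvit.split(" "):
--         if cha.startswith(c):
--             nove.append(izloci_besedo(cha))
--     return nove
--
-- def omembe(tviti):
--     d = {}
--     vsi = vsi_avtorji(tviti)
--     for i in vsi:
--         d[i] = []
--     for tv in tviti:
--         if se_zacne_z(tv, "@"):
--             kat = se_zacne_z(tv,"@")
--             for i in kat:
--                 d[avtor(tv)].append(i)
--     return d
-- ===== SOURCE B (Python) =====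
-- def avtor(tvit):
--     return tvit.split(":")[0]
--
-- def izloci_besedo(beseda):
--     for c in beseda:
--         if c.isalnum():
--             break
--         else:
--             beseda = beseda[1:]
--     beseda = beseda[::-1]
--     for c2 in beseda:
--         if c2.isalnum():
--             break
--         else:
--             beseda = beseda[1:]
--     return beseda[::-1]
--
-- def se_zacne_z(tvit, c):
--     nove = []
--     for cha in tvit.split(" "):
--         if cha.startswith(c):
--             nove.append(izloci_besedo(cha))
--     return nove
--
-- def omembe(tviti):
--     d = {}
--     for tv in tviti:
--         a = avtor(tv)
--         d.setdefault(a, [])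
--         d[a].extend(se_zacne_z(tv, "@"))
--     return d
-- ===== Notes on version B (the rewrite author's own statement) =====
-- stated objective: simpler
-- what changed: Replaces A's two-pass shape (collect all authors, dedup them with a quadratic membership scan, pre-seed the dict, then rescan the tweets computing se_zacne_z twice per tweet) by a single pass over the tweets using dict.setdefault plus extend; unikati and vsi_avtorji disappear.
import Mathlib
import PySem

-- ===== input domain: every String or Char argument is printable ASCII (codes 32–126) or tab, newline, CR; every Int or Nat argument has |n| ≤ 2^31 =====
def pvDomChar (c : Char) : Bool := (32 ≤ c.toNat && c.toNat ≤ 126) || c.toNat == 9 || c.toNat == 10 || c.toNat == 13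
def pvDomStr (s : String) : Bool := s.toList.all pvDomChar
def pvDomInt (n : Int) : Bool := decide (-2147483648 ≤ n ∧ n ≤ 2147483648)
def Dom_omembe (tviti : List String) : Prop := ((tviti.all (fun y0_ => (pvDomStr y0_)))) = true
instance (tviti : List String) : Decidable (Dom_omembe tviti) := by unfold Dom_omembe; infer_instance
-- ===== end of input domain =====

-- B replaces A's two-pass shape (collect & dedup all authors, then rescan the tweets) by a single
-- pass over the tweets with dict.setdefault — simpler: unikati/vsi_avtorji disappear entirely.

-- ===== PORT A =====
-- helpers shared verbatim by Source A and Source B (avtor, izloci_besedo, se_zacne_z); unikati is A-only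
def pvUnikati (s : List String) : List String :=
  s.foldl (fun nov el => if nov.contains el then nov else nov ++ [el]) []

-- tvit.split(":")[0]: split with a nonempty separator always returns some nonempty list,
-- so getD/headD are never hit and the Python [0] never raises
def pvAvtor (tvit : String) : String :=
  ((PySem.Str.split? tvit ":").getD []).headD ""

-- 'for c in beseda: if c.isalnum(): break else: beseda = beseda[1:]' — the loop iterates over the
-- string it entered with while the variable shrinks; beseda[1:] = List.drop 1 (exact, also on "")
def pvStripLoop : List Char → List Char → List Char
  | [], b => b
  | c :: rest, b => if PySem.Chars.isalnum c then b else pvStripLoop rest (b.drop 1)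

def pvIzlociBesedo (beseda : String) : String :=
  let b1 := pvStripLoop beseda.toList beseda.toList
  let b2 := b1.reverse
  let b3 := pvStripLoop b2 b2
  String.ofList b3.reverse

def pvSeZacneZ (tvit : String) (c : String) : List String :=
  ((PySem.Str.split? tvit " ").getD []).foldl
    (fun nove cha => if PySem.Str.startswith cha c then nove ++ [pvIzlociBesedo cha] else nove) []

def omembe (tviti : List String) : List (String × List String) :=
  let seznam := tviti.foldl (fun acc vrstica => acc ++ [pvAvtor vrstica]) []
  let vsi := pvUnikati seznam
  let d := vsi.foldl (fun d i => d.insert i ([] : List String)) PySem.Dict.empty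
  -- d[avtor(tv)].append(i): the key is always present (avtor tv ∈ vsi), where modify is exact
  let d := tviti.foldl (fun d tv =>
    if pvSeZacneZ tv "@" ≠ [] then
      (pvSeZacneZ tv "@").foldl (fun d i => d.modify (pvAvtor tv) [] (fun l => l ++ [i])) d
    else d) d
  d.items

-- ===== PORT B =====
def omembe_alt (tviti : List String) : List (String × List String) :=
  -- d.setdefault(a, []); d[a].extend(...): after setdefault the key is present, where modify is exact
  (tviti.foldl (fun d tv =>
    let a := pvAvtor tv
    let d := d.setdefault a ([] : List String)
    d.modify a [] (fun l => l ++ pvSeZacneZ tv "@")) PySem.Dict.empty).items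

-- ===== PRECONDITION & SPEC =====
def Spec_omembe (tviti : List String) (out : List (String × List String)) : Prop := out = omembe_alt tviti
instance (tviti : List String) (out : List (String × List String)) : Decidable (Spec_omembe tviti out) := by unfold Spec_omembe; infer_instance

-- ===== CLAIM (what is proved, stated in full; the proofs are below) =====
def Claim_equal_omembe : Prop := ∀ (tviti : List String), Dom_omembe tviti → Spec_omembe tviti (omembe tviti)

-- ===== LEMMAS AND PROOFS =====

-- the mention list of one tweet
def pvMention (tv : String) : List String := pvSeZacneZ tv "@"

-- all mentions attributed to author a, in tweet order
def pvMentionsOf (a : String) (l : List String) : List String :=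
  l.flatMap (fun tv => if pvAvtor tv = a then pvMention tv else [])

-- the (author, mention) pairs of a tweet list
def pvPairs (l : List String) : List (String × String) :=
  l.flatMap (fun tv => (pvMention tv).map (fun i => (pvAvtor tv, i)))

-- A's two dict-building phases, named so the proofs can talk about them
def pvSeedA (l : List String) : PySem.Dict String (List String) :=
  l.foldl (fun d i => d.insert i ([] : List String)) PySem.Dict.empty

def pvDictA (tviti : List String) : PySem.Dict String (List String) :=
  tviti.foldl (fun d tv =>
    if pvSeZacneZ tv "@" ≠ [] then
      (pvSeZacneZ tv "@").foldl (fun d i => d.modify (pvAvtor tv) [] (fun l => l ++ [i])) d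
    else d) (pvSeedA (pvUnikati (tviti.foldl (fun acc vrstica => acc ++ [pvAvtor vrstica]) [])))

-- B's dict
def pvDictB (tviti : List String) : PySem.Dict String (List String) :=
  tviti.foldl (fun d tv =>
    let a := pvAvtor tv
    let d := d.setdefault a ([] : List String)
    d.modify a [] (fun l => l ++ pvSeZacneZ tv "@")) PySem.Dict.empty

lemma omembe_eq_items (tviti : List String) : omembe tviti = (pvDictA tviti).items := rfl

lemma omembe_alt_eq_items (tviti : List String) : omembe_alt tviti = (pvDictB tviti).items := rfl

lemma pvUnikati_eq_ofList (s : List String) : pvUnikati s = PySem.Set.ofList s := rfl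

lemma setdefault_eq {κ ν : Type} [BEq κ] (d : PySem.Dict κ ν) (k : κ) (v : ν) :
    d.setdefault k v = if d.contains k then d else d.insert k v := by
  by_cases h : d.contains k = true <;>
    simp [PySem.Dict.setdefault, PySem.Dict.insert, h]

-- a dict is determined by its key list (nodup) and its get? function
lemma dict_ext {κ ν : Type} [BEq κ] [LawfulBEq κ] (d1 d2 : PySem.Dict κ ν)
    (h1 : d1.keys.Nodup) (hk : d1.keys = d2.keys) (hv : ∀ k, d1.get? k = d2.get? k) :
    d1 = d2 := by
  have h2 : d2.keys.Nodup := hk ▸ h1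
  obtain ⟨l1⟩ := d1
  obtain ⟨l2⟩ := d2
  congr 1
  have hlen : l1.length = l2.length := by
    have := congrArg List.length hk
    simpa [PySem.Dict.keys] using this
  apply List.ext_getElem hlen
  intro i hi1 hi2
  have hfst : l1[i].1 = l2[i].1 := by
    have := congrArg (fun l => l[i]?) hk
    simpa [PySem.Dict.keys, List.getElem?_map, List.getElem?_eq_getElem, hi1, hi2] using this
  have hm1 : (l1[i].1, l1[i].2) ∈ (PySem.Dict.mk l1).items := by
    simp
  have hm2 : (l2[i].1, l2[i].2) ∈ (PySem.Dict.mk l2).items := by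
    simp
  have hg1 := PySem.Dict.get?_of_mem_items ⟨l1⟩ hm1 h1
  have hg2 := PySem.Dict.get?_of_mem_items ⟨l2⟩ hm2 h2
  have : some l1[i].2 = some l2[i].2 := by
    rw [← hg1, ← hg2, hfst]; exact hv _
  exact Prod.ext hfst (by simpa using this)

-- Set.update by already-present elements is the identity
lemma update_absorb {α : Type} [BEq α] [LawfulBEq α] (xs : List α) (s : PySem.Set α)
    (h : ∀ x ∈ xs, x ∈ s) : PySem.Set.update s xs = s := by
  induction xs generalizing s with
  | nil => rfl
  | cons x xs ih =>
    have hx : x ∈ s := h x (List.mem_cons_self ..)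
    have hadd : PySem.Set.add s x = s := by
      simp [PySem.Set.add, hx]
    simpa [PySem.Set.update, hadd] using ih s (fun y hy => h y (List.mem_cons_of_mem _ hy))

-- A's append phase is the pair-wise modify fold
lemma dictA_as_pairs (tviti : List String) :
    pvDictA tviti =
      (pvPairs tviti).foldl (fun d p => d.modify p.1 [] (fun l => l ++ [p.2]))
        (pvSeedA (pvUnikati (tviti.foldl (fun acc vrstica => acc ++ [pvAvtor vrstica]) []))) := by
  unfold pvDictA pvPairs
  rw [List.foldl_flatMap]
  apply PySem.List.foldl_congr_mem
  intro d tv _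
  by_cases h : pvSeZacneZ tv "@" = []
  · simp [h, pvMention]
  · simp [h, pvMention, List.foldl_map]

lemma seedA_getD_aux (l : List String) (d : PySem.Dict String (List String))
    (hd : ∀ b, d.getD b [] = []) (a : String) :
    (l.foldl (fun d i => d.insert i ([] : List String)) d).getD a [] = [] := by
  induction l generalizing d with
  | nil => exact hd a
  | cons x l ih =>
    refine ih _ (fun b => ?_)
    rw [PySem.Dict.getD_insert]
    split <;> simp [hd]

lemma seedA_getD (l : List String) (a : String) :
    (pvSeedA l).getD a [] = [] :=
  seedA_getD_aux l PySem.Dict.empty (fun b => PySem.Dict.getD_empty b []) a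

lemma pairs_filter (tviti : List String) (a : String) :
    ((pvPairs tviti).filter (fun p => p.1 == a)).map (fun p => p.2) = pvMentionsOf a tviti := by
  induction tviti with
  | nil => rfl
  | cons tv l ih =>
    have hcons : pvPairs (tv :: l) =
        (pvMention tv).map (fun i => (pvAvtor tv, i)) ++ pvPairs l := by
      simp [pvPairs]
    rw [hcons, List.filter_append, List.map_append, ih]
    by_cases h : pvAvtor tv = a <;>
      simp [pvMentionsOf, List.filter_map, Function.comp_def, h]

lemma dictA_getD (tviti : List String) (a : String) :
    (pvDictA tviti).getD a [] = pvMentionsOf a tviti := by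
  rw [dictA_as_pairs, PySem.Dict.getD_foldl_modify_append, seedA_getD, pairs_filter,
    List.nil_append]

lemma dictA_keys (tviti : List String) :
    (pvDictA tviti).keys = PySem.Set.ofList (tviti.map pvAvtor) := by
  rw [dictA_as_pairs]
  rw [PySem.Dict.keys_foldl_modify_key (pvPairs tviti) Prod.fst [] (fun _ p => (· ++ [p.2]))]
  unfold pvSeedA
  rw [PySem.Dict.keys_foldl_insert _ (fun _ _ => ([] : List String))]
  rw [PySem.Dict.keys_empty]
  have hseed : PySem.Set.update ([] : PySem.Set String)
      (pvUnikati (tviti.foldl (fun acc vrstica => acc ++ [pvAvtor vrstica]) []))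
      = PySem.Set.ofList (tviti.map pvAvtor) := by
    rw [pvUnikati_eq_ofList, PySem.List.foldl_append_singleton_eq_map, List.nil_append]
    show PySem.Set.ofList (PySem.Set.ofList (tviti.map pvAvtor))
        = PySem.Set.ofList (tviti.map pvAvtor)
    exact PySem.Set.ofList_ofList _
  rw [hseed]
  apply update_absorb
  intro x hx
  rw [PySem.Set.mem_ofList]
  obtain ⟨p, hp, rfl⟩ := List.mem_map.mp hx
  obtain ⟨tv, htv, hpm⟩ := List.mem_flatMap.mp hp
  obtain ⟨i, _, rfl⟩ := List.mem_map.mp hpm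
  exact List.mem_map.mpr ⟨tv, htv, rfl⟩

lemma stepB_getD (d : PySem.Dict String (List String)) (tv : String) (a : String) :
    ((d.setdefault (pvAvtor tv) []).modify (pvAvtor tv) [] (fun l => l ++ pvSeZacneZ tv "@")).getD a []
      = if pvAvtor tv = a then d.getD a [] ++ pvMention tv else d.getD a [] := by
  rw [setdefault_eq]
  by_cases hc : d.contains (pvAvtor tv) = true
  · rw [if_pos hc, PySem.Dict.getD_modify]
    by_cases ha : pvAvtor tv = a
    · simp [ha, pvMention]
    · simp [ha, Ne.symm ha]
  · rw [if_neg hc, PySem.Dict.getD_modify]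
    by_cases ha : pvAvtor tv = a
    · subst ha
      rw [if_pos rfl, if_pos rfl, PySem.Dict.getD_insert_self,
        PySem.Dict.getD_of_not_contains d [] (by simpa using hc)]
      simp [pvMention]
    · rw [if_neg (fun h => ha h.symm), if_neg ha,
        PySem.Dict.getD_insert_of_ne d [] [] (fun h => ha h.symm)]

lemma stepB_keys (d : PySem.Dict String (List String)) (tv : String) :
    ((d.setdefault (pvAvtor tv) []).modify (pvAvtor tv) [] (fun l => l ++ pvSeZacneZ tv "@")).keys
      = PySem.Set.add d.keys (pvAvtor tv) := by
  rw [setdefault_eq]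
  by_cases hc : d.contains (pvAvtor tv) = true
  · rw [if_pos hc, PySem.Dict.keys_modify, PySem.Dict.keys_insert_of_contains _ _ hc]
    have : pvAvtor tv ∈ d.keys := (PySem.Dict.contains_iff_mem_keys d _).mp hc
    simp [PySem.Set.add, this]
  · rw [if_neg hc, PySem.Dict.keys_modify,
      PySem.Dict.keys_insert_of_contains _ _ (PySem.Dict.contains_insert_self d _ []),
      PySem.Dict.keys_insert_of_not_contains d [] (by simpa using hc)]
    have : pvAvtor tv ∉ d.keys := by
      rw [← PySem.Dict.contains_iff_mem_keys]
      simpa using hc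
    simp [PySem.Set.add, this]

lemma dictB_getD_aux (l : List String) (d : PySem.Dict String (List String)) (a : String) :
    (l.foldl (fun d tv =>
        let a := pvAvtor tv
        let d := d.setdefault a ([] : List String)
        d.modify a [] (fun l => l ++ pvSeZacneZ tv "@")) d).getD a []
      = d.getD a [] ++ pvMentionsOf a l := by
  induction l generalizing d with
  | nil => simp [pvMentionsOf]
  | cons tv l ih =>
    rw [List.foldl_cons, ih, stepB_getD]
    by_cases h : pvAvtor tv = a <;>
      simp [pvMentionsOf, h, List.append_assoc]

lemma dictB_keys_aux (l : List String) (d : PySem.Dict String (List String)) :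
    (l.foldl (fun d tv =>
        let a := pvAvtor tv
        let d := d.setdefault a ([] : List String)
        d.modify a [] (fun l => l ++ pvSeZacneZ tv "@")) d).keys
      = PySem.Set.update d.keys (l.map pvAvtor) := by
  induction l generalizing d with
  | nil => rfl
  | cons tv l ih =>
    rw [List.foldl_cons, ih, stepB_keys]
    rfl

lemma dictB_keys (tviti : List String) :
    (pvDictB tviti).keys = PySem.Set.ofList (tviti.map pvAvtor) := by
  rw [pvDictB, dictB_keys_aux, PySem.Dict.keys_empty]
  rfl

lemma dictB_getD (tviti : List String) (a : String) :
    (pvDictB tviti).getD a [] = pvMentionsOf a tviti := by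
  rw [pvDictB, dictB_getD_aux]
  simp

lemma get?_eq_some_getD {κ ν : Type} [BEq κ] [LawfulBEq κ] (d : PySem.Dict κ ν) (k : κ) (d0 : ν)
    (h : d.contains k = true) : d.get? k = some (d.getD k d0) := by
  rcases hh : d.get? k with _ | v
  · rw [PySem.Dict.contains_eq_isSome_get?, hh] at h
    simp at h
  · rw [PySem.Dict.getD_of_get?_eq_some d d0 hh]

lemma dictA_eq_dictB (tviti : List String) : pvDictA tviti = pvDictB tviti := by
  apply dict_ext
  · rw [dictA_keys]
    exact PySem.Set.nodup_ofList _
  · rw [dictA_keys, dictB_keys]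
  · intro k
    by_cases hm : k ∈ PySem.Set.ofList (tviti.map pvAvtor)
    · have hca : (pvDictA tviti).contains k = true := by
        rw [PySem.Dict.contains_iff_mem_keys, dictA_keys]; exact hm
      have hcb : (pvDictB tviti).contains k = true := by
        rw [PySem.Dict.contains_iff_mem_keys, dictB_keys]; exact hm
      rw [get?_eq_some_getD _ _ [] hca, get?_eq_some_getD _ _ [] hcb,
        dictA_getD, dictB_getD]
    · rw [(PySem.Dict.get?_eq_none_iff_not_mem_keys _ _).mpr (by rw [dictA_keys]; exact hm),
        (PySem.Dict.get?_eq_none_iff_not_mem_keys _ _).mpr (by rw [dictB_keys]; exact hm)]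

-- ===== VERDICT (by name: the statement is the Claim_ definition above) =====
theorem omembe_spec : Claim_equal_omembe := by
  intro tviti _
  show omembe tviti = omembe_alt tviti
  rw [omembe_eq_items, omembe_alt_eq_items, dictA_eq_dictB]
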